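-- pv_equiv track=rewrite | github.com/SodiumBank/Datum | services/api/core/plan_validator.py | validate_locked_sequence_integrity
-- ===== SOURCE A (Python) =====
-- from typing import Any, Dict, List
--
-- def validate_locked_sequence_integrity(steps: List[Dict[str, Any]]) -> tuple[bool, str]:
--     """
--     Validate that locked sequences maintain their relative order.
--
--     For NASA polymerics, the sequence must be: CLEAN → BAKE → POLYMER → CURE → INSPECT
--     """
--     # Find locked steps and their sequences
--     locked_steps = [
--         (step.get("type"), step.get("sequence"))
--         for step in steps
--         if step.get("locked_sequence")
--     ]
--
--     if not locked_steps:
--         return True, ""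
--
--     # Sort by sequence
--     locked_steps.sort(key=lambda x: x[1])
--
--     # Check NASA polymerics sequence
--     expected_order = ["CLEAN", "BAKE", "POLYMER", "CURE", "INSPECT"]
--     found_types = [step_type for step_type, _ in locked_steps]
--
--     # Check if all expected steps are present (if any are locked)
--     has_polymerics = any(t in found_types for t in expected_order)
--     if has_polymerics:
--         # Verify order for steps that are present
--         filtered_order = [t for t in expected_order if t in found_types]
--         if found_types != filtered_order:
--             return False, (
--                 f"Locked polymerics sequence violation. "
--                 f"Expected order: {' → '.join(filtered_order)}, "
--                 f"Found: {' → '.join(found_types)}"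
--             )
--
--     return True, ""
-- ===== SOURCE B (Python) =====
-- from typing import Any, Dict, List
--
-- EXPECTED_ORDER = ["CLEAN", "BAKE", "POLYMER", "CURE", "INSPECT"]
--
--
-- def _locked_pairs(steps):
--     return [
--         (step.get("type"), step.get("sequence"))
--         for step in steps
--         if step.get("locked_sequence")
--     ]
--
--
-- def _is_subseq(xs, ys):
--     """Greedy two-pointer subsequence test: is xs a subsequence of ys?"""
--     i = 0
--     for x in xs:
--         while i < len(ys) and ys[i] != x:
--             i += 1
--         if i == len(ys):
--             return False
--         i += 1
--     return True
--
--
-- def validate_locked_sequence_integrity(steps: List[Dict[str, Any]]) -> tuple[bool, str]: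
--     pairs = _locked_pairs(steps)
--     if not pairs:
--         return True, ""
--     pairs.sort(key=lambda x: x[1])
--     found = [t for t, _ in pairs]
--     if all(t not in EXPECTED_ORDER for t in found):
--         return True, ""
--     if _is_subseq(found, EXPECTED_ORDER):
--         return True, ""
--     wanted = [t for t in EXPECTED_ORDER if t in found]
--     return False, (
--         f"Locked polymerics sequence violation. "
--         f"Expected order: {' → '.join(wanted)}, "
--         f"Found: {' → '.join(found)}"
--     )
-- ===== Notes on version B (the rewrite author's own statement) =====
-- stated objective: alternative
-- what changed: A validates the order by rebuilding filtered_order from expected_order and comparing it to found_types for list equality; B instead runs a greedy two-pointer subsequence scan of found_types against the expected order (rebuilding the expected sublist only to format the identical failure message), with small helper functions replacing A's monolithic body.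
import Mathlib
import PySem

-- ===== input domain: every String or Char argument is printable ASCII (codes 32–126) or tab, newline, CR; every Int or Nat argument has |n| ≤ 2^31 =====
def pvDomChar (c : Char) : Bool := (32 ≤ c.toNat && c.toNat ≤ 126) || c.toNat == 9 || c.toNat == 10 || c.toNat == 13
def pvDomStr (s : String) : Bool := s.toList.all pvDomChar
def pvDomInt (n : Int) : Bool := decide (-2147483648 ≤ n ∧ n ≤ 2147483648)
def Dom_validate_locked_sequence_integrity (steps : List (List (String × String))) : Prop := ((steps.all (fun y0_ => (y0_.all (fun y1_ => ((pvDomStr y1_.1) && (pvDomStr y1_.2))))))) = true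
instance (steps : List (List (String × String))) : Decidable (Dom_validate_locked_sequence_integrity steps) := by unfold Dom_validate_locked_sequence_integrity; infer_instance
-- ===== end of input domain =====

-- B replaces A's "build filtered_order and compare lists" order check by a greedy
-- two-pointer subsequence test against the expected order (objective: alternative
-- decomposition, same cost); equal return values are proved below.

-- ===== PORT A =====
def validate_locked_sequence_integrity (steps : List (List (String × String))) : Bool × String :=
  let locked_steps :=
    (steps.filter (fun step => decide ((PySem.Dict.mk step).getD "locked_sequence" "" ≠ ""))).map
      (fun step => ((PySem.Dict.mk step).getD "type" "", (PySem.Dict.mk step).getD "sequence" ""))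
  if locked_steps.isEmpty then (true, "")
  else
    let locked_steps := PySem.List.sorted locked_steps (fun x => x.2) false
    let expected_order := ["CLEAN", "BAKE", "POLYMER", "CURE", "INSPECT"]
    let found_types := locked_steps.map (fun p => p.1)
    let has_polymerics := expected_order.any (fun t => found_types.contains t)
    if has_polymerics then
      let filtered_order := expected_order.filter (fun t => found_types.contains t)
      if found_types ≠ filtered_order then
        (false, "Locked polymerics sequence violation. Expected order: " ++
          PySem.Str.join " → " filtered_order ++ ", Found: " ++ PySem.Str.join " → " found_types)
      else (true, "")
    else (true, "")

-- ===== PORT B =====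
def pvLockedPairs (steps : List (List (String × String))) : List (String × String) :=
  (steps.filter (fun step => decide ((PySem.Dict.mk step).getD "locked_sequence" "" ≠ ""))).map
    (fun step => ((PySem.Dict.mk step).getD "type" "", (PySem.Dict.mk step).getD "sequence" ""))

-- greedy two-pointer subsequence test (the index i of Source B is the consumed prefix of ys)
def pvIsSubseq : List String → List String → Bool
  | [], _ => true
  | _ :: _, [] => false
  | x :: xs, y :: ys => if y == x then pvIsSubseq xs ys else pvIsSubseq (x :: xs) ys

def pvExpectedOrder : List String := ["CLEAN", "BAKE", "POLYMER", "CURE", "INSPECT"]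

def validate_locked_sequence_integrity_alt (steps : List (List (String × String))) : Bool × String :=
  let pairs := pvLockedPairs steps
  if pairs.isEmpty then (true, "")
  else
    let pairs := PySem.List.sorted pairs (fun x => x.2) false
    let found := pairs.map (fun p => p.1)
    if found.all (fun t => !(pvExpectedOrder.contains t)) then (true, "")
    else if pvIsSubseq found pvExpectedOrder then (true, "")
    else
      let wanted := pvExpectedOrder.filter (fun t => found.contains t)
      (false, "Locked polymerics sequence violation. Expected order: " ++
        PySem.Str.join " → " wanted ++ ", Found: " ++ PySem.Str.join " → " found)

-- ===== PRECONDITION & SPEC =====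
-- Pre_ excludes EXACTLY the inputs on which the Python A raises TypeError: a locked
-- step without a "sequence" key makes the sort compare None when there are >= 2 locked
-- steps, and a locked step without a "type" key puts None into the violation-message
-- join, which is reached exactly when some locked step's type is an expected one.
def Pre_validate_locked_sequence_integrity (steps : List (List (String × String))) : Prop :=
  let L := steps.filter (fun step => decide ((PySem.Dict.mk step).getD "locked_sequence" "" ≠ ""))
  ¬ (2 ≤ L.length ∧ ∃ step ∈ L, (PySem.Dict.mk step).contains "sequence" = false) ∧
  ¬ ((∃ step ∈ L, (PySem.Dict.mk step).contains "type" = false) ∧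
     (∃ step ∈ L, (PySem.Dict.mk step).getD "type" "" ∈ pvExpectedOrder))
instance (steps : List (List (String × String))) : Decidable (Pre_validate_locked_sequence_integrity steps) := by unfold Pre_validate_locked_sequence_integrity; infer_instance

def pvWitness_validate_locked_sequence_integrity : (List (List (String × String))) :=
  [[("type", "BAKE"), ("sequence", "2"), ("locked_sequence", "x")],
   [("type", "CLEAN"), ("sequence", "1"), ("locked_sequence", "x")]]

def Spec_validate_locked_sequence_integrity (steps : List (List (String × String))) (out : Bool × String) : Prop := out = validate_locked_sequence_integrity_alt steps
instance (steps : List (List (String × String))) (out : Bool × String) : Decidable (Spec_validate_locked_sequence_integrity steps out) := by unfold Spec_validate_locked_sequence_integrity; infer_instance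

-- ===== CLAIM (what is proved, stated in full; the proofs are below) =====
def Claim_equal_validate_locked_sequence_integrity : Prop := ∀ (steps : List (List (String × String))), Dom_validate_locked_sequence_integrity steps → Pre_validate_locked_sequence_integrity steps → Spec_validate_locked_sequence_integrity steps (validate_locked_sequence_integrity steps)

-- ===== LEMMAS AND PROOFS =====

-- a nodup supersequence filtered down to the members of a sublist gives back the sublist
theorem pv_filter_eq_of_sublist {E L : List String} (h : List.Sublist L E) (hnd : E.Nodup) :
    E.filter (fun t => L.contains t) = L := by
  induction h with
  | slnil => simp
  | cons a h ih =>
      rename_i l₁ l₂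
      have hnd' : l₂.Nodup := hnd.of_cons
      have ha : a ∉ l₂ := (List.nodup_cons.mp hnd).1
      have ha₁ : a ∉ l₁ := fun hmem => ha (h.subset hmem)
      have ih' : List.filter (fun t => decide (t ∈ l₁)) l₂ = l₁ := by simpa using ih hnd'
      simp [ha₁, ih']
  | cons₂ a h ih =>
      rename_i l₁ l₂
      have hnd' : l₂.Nodup := hnd.of_cons
      have ha : a ∉ l₂ := (List.nodup_cons.mp hnd).1
      have hcongr : l₂.filter (fun t => decide (t = a) || decide (t ∈ l₁))
          = l₂.filter (fun t => decide (t ∈ l₁)) := by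
        apply List.filter_congr
        intro t ht
        have hta : t ≠ a := fun e => ha (e ▸ ht)
        simp [hta]
      have ih' : List.filter (fun t => decide (t ∈ l₁)) l₂ = l₁ := by simpa using ih hnd'
      simp [hcongr, ih']

-- the greedy two-pointer scan decides the subsequence relation
theorem pv_isSubseq_iff : ∀ (ys xs : List String), pvIsSubseq xs ys = true ↔ List.Sublist xs ys := by
  intro ys
  induction ys with
  | nil =>
      intro xs
      cases xs with
      | nil => simp [pvIsSubseq]
      | cons x xs => simp [pvIsSubseq]
  | cons y ys ih =>
      intro xs
      cases xs with
      | nil => simp [pvIsSubseq]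
      | cons x xs =>
          by_cases hxy : y = x
          · subst hxy
            simp only [pvIsSubseq, beq_self_eq_true, if_true]
            rw [ih xs]
            exact (List.cons_sublist_cons).symm
          · have hbeq : (y == x) = false := beq_eq_false_iff_ne.mpr hxy
            simp only [pvIsSubseq, hbeq, Bool.false_eq_true, if_false]
            rw [ih (x :: xs)]
            constructor
            · exact fun h => h.cons y
            · intro h
              cases h with
              | cons _ h => exact h
              | cons₂ _ h => exact absurd rfl hxy

-- membership tested from either side: the two "any" guards agree
theorem pv_any_comm (E L : List String) :
    E.any (fun t => L.contains t) = L.any (fun t => E.contains t) := by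
  rw [Bool.eq_iff_iff]
  simp only [List.any_eq_true, List.contains_eq_mem, decide_eq_true_eq]
  exact ⟨fun ⟨t, h1, h2⟩ => ⟨t, h2, h1⟩, fun ⟨t, h1, h2⟩ => ⟨t, h2, h1⟩⟩

-- A's list-equality order check and B's greedy subsequence check agree
theorem pv_check_iff (L : List String) :
    (L = pvExpectedOrder.filter (fun t => L.contains t)) ↔ pvIsSubseq L pvExpectedOrder = true := by
  rw [pv_isSubseq_iff]
  constructor
  · intro h
    rw [h]
    exact List.filter_sublist
  · intro h
    exact (pv_filter_eq_of_sublist h (by decide)).symm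

-- the whole post-sort branching of A and of B agree, for any list of found types
theorem pv_branch_eq (F : List String) :
    (if pvExpectedOrder.any (fun t => F.contains t) then
      (if F ≠ pvExpectedOrder.filter (fun t => F.contains t) then
        ((false, "Locked polymerics sequence violation. Expected order: " ++
          PySem.Str.join " → " (pvExpectedOrder.filter (fun t => F.contains t)) ++ ", Found: " ++
          PySem.Str.join " → " F) : Bool × String)
      else (true, ""))
    else (true, "")) =
    (if F.all (fun t => !(pvExpectedOrder.contains t)) then (true, "")
    else if pvIsSubseq F pvExpectedOrder then (true, "")
    else (false, "Locked polymerics sequence violation. Expected order: " ++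
      PySem.Str.join " → " (pvExpectedOrder.filter (fun t => F.contains t)) ++ ", Found: " ++
      PySem.Str.join " → " F)) := by
  have hall : F.all (fun t => !(pvExpectedOrder.contains t))
      = !(pvExpectedOrder.any (fun t => F.contains t)) := by
    rw [pv_any_comm]
    simp [List.all_eq_not_any_not]
  by_cases hany : (pvExpectedOrder.any (fun t => F.contains t)) = true
  · have hB : ¬ ((F.all (fun t => !(pvExpectedOrder.contains t))) = true) := by
      rw [hall, hany]; decide
    rw [if_pos hany, if_neg hB]
    by_cases hsub : pvIsSubseq F pvExpectedOrder = true
    · rw [if_pos hsub, if_neg (not_not_intro ((pv_check_iff F).mpr hsub))]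
    · rw [if_neg hsub, if_pos (fun h => hsub ((pv_check_iff F).mp h))]
  · have hanyf : (pvExpectedOrder.any (fun t => F.contains t)) = false := eq_false_of_ne_true hany
    have hB : (F.all (fun t => !(pvExpectedOrder.contains t))) = true := by
      rw [hall, hanyf]; decide
    rw [if_neg hany, if_pos hB]

-- ===== VERDICT (by name: the statement is the Claim_ definition above) =====
theorem validate_locked_sequence_integrity_spec : Claim_equal_validate_locked_sequence_integrity := by
  intro steps _ _
  unfold Spec_validate_locked_sequence_integrity
  show validate_locked_sequence_integrity steps = validate_locked_sequence_integrity_alt steps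
  unfold validate_locked_sequence_integrity validate_locked_sequence_integrity_alt pvLockedPairs
  simp only []
  generalize (steps.filter (fun step => decide ((PySem.Dict.mk step).getD "locked_sequence" "" ≠ ""))).map
      (fun step => ((PySem.Dict.mk step).getD "type" "", (PySem.Dict.mk step).getD "sequence" "")) = L0
  by_cases hemp : L0.isEmpty = true
  · rw [if_pos hemp, if_pos hemp]
  · rw [if_neg hemp, if_neg hemp]
    exact pv_branch_eq ((PySem.List.sorted L0 (fun x => x.2) false).map (fun p => p.1))
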